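-- pv_equiv track=rewrite | github.com/RottenDoom/Competitive-Prog-Codes | BBlankspace.py | BBlanckspace
-- ===== SOURCE A (Python) =====
-- def BBlanckspace(L):
--     l = []
--     s = 0
--     for i in L:
--         if i == 0:
--             s += 1
--         elif i == 1:
--             l.append(s)
--             s = 0
--     if len(l) == 0:
--         return 0
--     else:
--         return max(l)
-- ===== SOURCE B (Python) =====
-- def BBlanckspace(L):
--     s = ''.join('0' if i == 0 else '1' for i in L if i == 0 or i == 1)
--     segs = s.split('1')
--     if len(segs) == 1:
--         return 0
--     return max(len(x) for x in segs[:-1])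
-- ===== Notes on version B (the rewrite author's own statement) =====
-- stated objective: alternative
-- what changed: A runs a counter/accumulator loop appending each finished zero-run to a list and takes max at the end; B instead builds a filtered '0'/'1' string, splits it on '1' and returns the max length among the segments before the last one (0 when no '1' occurs).
import Mathlib
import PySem

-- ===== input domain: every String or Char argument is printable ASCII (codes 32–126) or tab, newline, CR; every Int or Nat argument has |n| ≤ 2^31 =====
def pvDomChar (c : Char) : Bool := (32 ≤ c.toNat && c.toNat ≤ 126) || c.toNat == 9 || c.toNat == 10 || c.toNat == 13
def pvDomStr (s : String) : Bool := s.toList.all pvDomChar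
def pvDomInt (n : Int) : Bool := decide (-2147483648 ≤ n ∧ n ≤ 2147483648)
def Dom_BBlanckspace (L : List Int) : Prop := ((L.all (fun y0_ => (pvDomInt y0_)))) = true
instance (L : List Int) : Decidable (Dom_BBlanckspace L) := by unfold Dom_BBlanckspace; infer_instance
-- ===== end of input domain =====

-- B replaces A's counter-and-list loop by building a filtered '0'/'1' string, splitting it on '1'
-- and taking the max segment length before the last '1' (objective: alternative decomposition, not faster).

-- ===== PORT A =====
-- A's loop: accumulate (l, s); append s to l on a 1, bump s on a 0, skip otherwise; then max(l) or 0.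
def pvStepA (p : List Int × Int) (i : Int) : List Int × Int :=
  if i = 0 then (p.1, p.2 + 1)
  else if i = 1 then (p.1 ++ [p.2], 0)
  else p

def BBlanckspace (L : List Int) : Int :=
  let r := L.foldl pvStepA ([], 0)
  if r.1.length = 0 then 0
  else
    match PySem.List.max? r.1 (fun x => x) with   -- max(l), Python's first-maximal element
    | some m => m
    | none => 0

-- ===== PORT B =====
-- Source B: s = ''.join('0' if i == 0 else '1' for i in L if i == 0 or i == 1)  (a filtering comprehension)
def pvFilt (L : List Int) : List Char :=
  L.filterMap (fun i => if i = 0 then some '0' else if i = 1 then some '1' else none)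

def BBlanckspace_alt (L : List Int) : Int :=
  let segs := (pvFilt L).splitOn '1'   -- s.split('1'), exact for a one-char separator
  if segs.length = 1 then 0
  else
    match PySem.List.max? (segs.dropLast.map (fun x => (x.length : Int))) (fun x => x) with
    | some m => m
    | none => 0

-- ===== PRECONDITION & SPEC =====
def Spec_BBlanckspace (L : List Int) (out : Int) : Prop := out = BBlanckspace_alt L
instance (L : List Int) (out : Int) : Decidable (Spec_BBlanckspace L out) := by unfold Spec_BBlanckspace; infer_instance

-- ===== CLAIM (what is proved, stated in full; the proofs are below) =====
def Claim_equal_BBlanckspace : Prop := ∀ (L : List Int), Dom_BBlanckspace L → Spec_BBlanckspace L (BBlanckspace L)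

-- ===== LEMMAS AND PROOFS =====

def pvRep (s : Int) : List Char := List.replicate s.toNat '0'

theorem pvAcc (L : List Int) : ∀ (l : List Int) (s : Int),
    L.foldl pvStepA (l, s) = (l ++ (L.foldl pvStepA ([], s)).1, (L.foldl pvStepA ([], s)).2) := by
  induction L with
  | nil => intro l s; simp
  | cons i t ih =>
    intro l s
    simp only [List.foldl_cons, pvStepA]
    split_ifs with h0 h1
    · exact ih l (s + 1)
    · simp only [List.nil_append]
      rw [ih (l ++ [s]) 0, ih [s] 0]; simp
    · exact ih l s

theorem pvNonneg (L : List Int) : ∀ (s : Int), 0 ≤ s →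
    (∀ x ∈ (L.foldl pvStepA ([], s)).1, 0 ≤ x) ∧ 0 ≤ (L.foldl pvStepA ([], s)).2 := by
  induction L with
  | nil => intro s hs; simpa using hs
  | cons i t ih =>
    intro s hs
    simp only [List.foldl_cons, pvStepA]
    split_ifs with h0 h1
    · exact ih (s + 1) (by omega)
    · simp only [List.nil_append]
      rw [pvAcc t [s] 0]
      obtain ⟨h1', h2'⟩ := ih 0 le_rfl
      refine ⟨?_, h2'⟩
      intro x hx
      simp only [List.cons_append, List.nil_append, List.mem_cons] at hx
      rcases hx with rfl | hx
      · exact hs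
      · exact h1' x hx
    · exact ih s hs

theorem pvNotSep (s : Int) : ∀ x ∈ pvRep s, ¬((x == '1') = true) := by
  intro x hx
  have := List.eq_of_mem_replicate hx
  subst this; decide

theorem pvGen (L : List Int) : ∀ (s : Int), 0 ≤ s →
    (pvRep s ++ pvFilt L).splitOn '1'
      = ((L.foldl pvStepA ([], s)).1).map pvRep ++ [pvRep (L.foldl pvStepA ([], s)).2] := by
  induction L with
  | nil =>
    intro s hs
    simp only [pvFilt, List.filterMap_nil, List.append_nil, List.foldl_nil, List.map_nil,
      List.nil_append, List.splitOn]
    exact List.splitOnP_eq_single _ _ (pvNotSep s)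
  | cons i t ih =>
    intro s hs
    simp only [pvFilt, List.filterMap_cons] at *
    by_cases h0 : i = 0
    · subst h0
      simp only [List.foldl_cons, pvStepA, reduceIte]
      have hrep : pvRep s ++ '0' :: (t.filterMap (fun i => if i = 0 then some '0' else if i = 1 then some '1' else none)) = pvRep (s + 1) ++ (t.filterMap (fun i => if i = 0 then some '0' else if i = 1 then some '1' else none)) := by
        simp only [pvRep]
        have : (s + 1).toNat = s.toNat + 1 := by omega
        rw [this, List.replicate_succ', List.append_assoc, List.singleton_append]
      rw [hrep]
      exact ih (s + 1) (by omega)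
    · by_cases h1 : i = 1
      · subst h1
        simp only [reduceIte, if_neg h0, List.foldl_cons, pvStepA]
        rw [List.splitOn, List.splitOnP_first _ _ (pvNotSep s) '1' (by decide)]
        simp only [List.nil_append]
        rw [pvAcc t [s] 0]
        have := ih 0 le_rfl
        simp only [pvRep, Int.toNat_zero, List.replicate_zero, List.nil_append, List.splitOn] at this
        rw [this]
        simp [pvRep]
      · simp only [if_neg h0, if_neg h1, List.foldl_cons, pvStepA]
        exact ih s hs

-- ===== VERDICT (by name: the statement is the Claim_ definition above) =====
theorem BBlanckspace_spec : Claim_equal_BBlanckspace := by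
  intro L _
  unfold Spec_BBlanckspace BBlanckspace BBlanckspace_alt
  simp only []
  have hgen := pvGen L 0 le_rfl
  simp only [pvRep, Int.toNat_zero, List.replicate_zero, List.nil_append] at hgen
  rw [hgen]
  obtain ⟨hall, _⟩ := pvNonneg L 0 le_rfl
  by_cases hnil : (L.foldl pvStepA ([], 0)).1 = []
  · simp [hnil]
  · set r := L.foldl pvStepA ([], 0) with hr
    have hlen : (r.1.map pvRep ++ [pvRep r.2]).length ≠ 1 := by
      simp only [List.length_append, List.length_map, List.length_singleton]
      intro h
      exact hnil (List.eq_nil_of_length_eq_zero (by omega))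
    rw [if_neg (by simpa [pvRep] using hlen), if_neg (by simpa using hnil)]
    have hdrop : (r.1.map pvRep ++ [pvRep r.2]).dropLast = r.1.map pvRep :=
      List.dropLast_concat
    rw [show (List.replicate r.2.toNat '0') = pvRep r.2 from rfl, hdrop]
    have hmap : (r.1.map pvRep).map (fun x => (x.length : Int)) = r.1 := by
      rw [List.map_map]
      have : ∀ x ∈ r.1, ((pvRep x).length : Int) = x := by
        intro x hx
        simp only [pvRep, List.length_replicate]
        exact Int.toNat_of_nonneg (hall x hx)
      calc r.1.map (fun x => ((pvRep x).length : Int)) = r.1.map id := List.map_congr_left this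
        _ = r.1 := List.map_id _
    rw [hmap]
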